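-- pv_equiv track=rewrite | github.com/mickmumpitz/ComfyUI-Mickmumpitz-Nodes | nodes/iterative_video.py | _select_iter_string
-- ===== SOURCE A (Python) =====
-- def _select_iter_string(string_batch, iteration):
--     """Select a string from a batch by iteration, falling back to last non-empty."""
--     if not string_batch:
--         return ""
--     last_nonempty = ""
--     for i in range(len(string_batch)):
--         if string_batch[i].strip():
--             last_nonempty = string_batch[i]
--         if i == iteration:
--             break
--     return last_nonempty
-- ===== SOURCE B (Python) =====
-- def _select_iter_string(string_batch, iteration):
--     """Select a string from a batch by iteration, falling back to last non-empty."""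
--     if not string_batch:
--         return ""
--     n = len(string_batch)
--     start = iteration if 0 <= iteration < n else n - 1
--     for i in range(start, -1, -1):
--         if string_batch[i].strip():
--             return string_batch[i]
--     return ""
-- ===== Notes on version B (the rewrite author's own statement) =====
-- stated objective: alternative
-- what changed: Replaces the forward scan that maintains a last-non-empty accumulator (with a break at iteration) by computing the effective stop index up front and scanning backwards from it, returning the first non-blank string found.
import Mathlib
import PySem

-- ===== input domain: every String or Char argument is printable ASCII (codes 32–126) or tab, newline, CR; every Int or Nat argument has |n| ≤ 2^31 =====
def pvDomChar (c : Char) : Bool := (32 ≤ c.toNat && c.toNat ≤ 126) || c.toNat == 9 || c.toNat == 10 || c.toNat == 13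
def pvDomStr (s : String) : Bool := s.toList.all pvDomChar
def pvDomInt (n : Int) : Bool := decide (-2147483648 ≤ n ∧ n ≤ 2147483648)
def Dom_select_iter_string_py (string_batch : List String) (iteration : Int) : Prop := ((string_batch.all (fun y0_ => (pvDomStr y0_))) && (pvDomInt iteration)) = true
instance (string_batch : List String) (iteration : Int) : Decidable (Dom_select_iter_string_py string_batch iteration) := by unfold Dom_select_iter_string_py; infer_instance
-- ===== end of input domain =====

-- B computes the effective stop index up front and scans backwards from it, returning
-- the first non-blank string (alternative decomposition; same O(n) cost as A).


-- ===== PORT A =====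
-- A's loop: forward over indices, keep the last non-blank string, break when i == iteration.
def selAGo (sb : List String) (iteration : Int) (i : Nat) (last : String) : String :=
  if _h : i < sb.length then
    let x := sb.getD i ""
    let last' := if PySem.Str.strip x != "" then x else last
    if (i : Int) = iteration then last'
    else selAGo sb iteration (i + 1) last'
  else last
termination_by sb.length - i

def select_iter_string_py (string_batch : List String) (iteration : Int) : String :=
  if string_batch = [] then ""
  else selAGo string_batch iteration 0 ""

-- ===== PORT B =====
-- B's loop: for i in range(start, -1, -1): return string_batch[i] if it strips non-empty.
def selBGo (sb : List String) (i : Nat) : String :=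
  let x := sb.getD i ""
  if PySem.Str.strip x != "" then x
  else if i = 0 then ""
  else selBGo sb (i - 1)

def select_iter_string_py_alt (string_batch : List String) (iteration : Int) : String :=
  if string_batch = [] then ""
  else
    let n : Int := string_batch.length
    let start : Int := if 0 ≤ iteration ∧ iteration < n then iteration else n - 1
    selBGo string_batch start.toNat

-- ===== PRECONDITION & SPEC =====
def Spec_select_iter_string_py (string_batch : List String) (iteration : Int) (out : String) : Prop := out = select_iter_string_py_alt string_batch iteration
instance (string_batch : List String) (iteration : Int) (out : String) : Decidable (Spec_select_iter_string_py string_batch iteration out) := by unfold Spec_select_iter_string_py; infer_instance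

-- ===== CLAIM (what is proved, stated in full; the proofs are below) =====
def Claim_equal_select_iter_string_py : Prop := ∀ (string_batch : List String) (iteration : Int), Dom_select_iter_string_py string_batch iteration → Spec_select_iter_string_py string_batch iteration (select_iter_string_py string_batch iteration)

-- ===== LEMMAS AND PROOFS =====

-- the truthiness test both loops apply
def pvNe (x : String) : Bool := PySem.Str.strip x != ""

-- the indexing both loops perform (kept opaque to simp)
def pvAt (sb : List String) (i : Nat) : String := sb.getD i ""

-- the "last non-blank in the index window [i, i+k)" normal form both loops reduce to
def pvWin (sb : List String) (i k : Nat) : Option String :=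
  ((List.range' i k).map (pvAt sb)).reverse.find? pvNe

theorem pvWin_cons (sb : List String) (i k : Nat) (d : String) :
    (pvWin sb i (k + 1)).getD d
      = (pvWin sb (i + 1) k).getD (if pvNe (pvAt sb i) then pvAt sb i else d) := by
  have h : List.range' i (k + 1) = i :: List.range' (i + 1) k := List.range'_succ ..
  rw [pvWin, pvWin, h]
  cases hne : pvNe (pvAt sb i) <;>
    simp [List.find?_append, List.find?, hne]

theorem pvWin_one (sb : List String) (i : Nat) (d : String) :
    (pvWin sb i 1).getD d = if pvNe (pvAt sb i) then pvAt sb i else d := by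
  cases hne : pvNe (pvAt sb i) <;> simp [pvWin, List.range', List.find?, hne]

theorem pvWin_concat (sb : List String) (k : Nat) (d : String) :
    (pvWin sb 0 (k + 1)).getD d
      = if pvNe (pvAt sb k) then pvAt sb k else (pvWin sb 0 k).getD d := by
  have h : List.range' 0 (k + 1) = List.range' 0 k ++ [k] := by
    simpa using (List.range'_concat (s := 0) (n := k) (step := 1))
  rw [pvWin, pvWin, h]
  cases hne : pvNe (pvAt sb k) <;>
    simp [hne]

-- A's loop from index i up to the effective stop index m equals the window normal form
theorem selAGo_eq_win (sb : List String) (it : Int) (m : Nat)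
    (hm : m < sb.length)
    (hbrk : ∀ j : Nat, j < sb.length → (j : Int) = it → j = m)
    (hstop : ((m : Int) = it) ∨ (m + 1 = sb.length)) :
    ∀ i last, i ≤ m → selAGo sb it i last = (pvWin sb i (m + 1 - i)).getD last := by
  intro i
  induction hk : m - i generalizing i with
  | zero =>
    intro last hi
    have hi' : i = m := by omega
    have hilen : i < sb.length := by omega
    rw [selAGo]
    have hw : m + 1 - i = 1 := by omega
    rw [hw, pvWin_one]
    rcases hstop with hb | hlen
    · have hb' : (i : Int) = it := by rw [hi']; exact hb
      simp only [dif_pos hilen, if_pos hb', pvNe, pvAt]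
    · by_cases hb : (i : Int) = it
      · simp only [dif_pos hilen, if_pos hb, pvNe, pvAt]
      · rw [dif_pos hilen]
        simp only [if_neg hb]
        rw [selAGo]
        have hnot : ¬ (i + 1 < sb.length) := by omega
        simp only [dif_neg hnot, pvNe, pvAt]
  | succ k ih =>
    intro last hi
    have hilt : i < m := by omega
    have hlen : i < sb.length := by omega
    rw [selAGo]
    have hb : ¬ ((i : Int) = it) := by
      intro h
      have := hbrk i hlen h
      omega
    simp only [dif_pos hlen, if_neg hb]
    rw [ih (i + 1) (by omega) _ (by omega)]
    have hw : m + 1 - i = (m + 1 - (i + 1)) + 1 := by omega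
    rw [hw, pvWin_cons]
    simp only [pvNe, pvAt]

-- B's loop from index j downwards equals the window normal form
theorem selBGo_eq_win (sb : List String) :
    ∀ j, selBGo sb j = (pvWin sb 0 (j + 1)).getD "" := by
  intro j
  induction j with
  | zero =>
    rw [selBGo, pvWin_one]
    simp [pvNe, pvAt]
  | succ k ih =>
    rw [selBGo, pvWin_concat]
    simp only [pvNe, pvAt, Nat.succ_ne_zero, if_false, Nat.add_sub_cancel, ih]

-- ===== VERDICT (by name: the statement is the Claim_ definition above) =====
theorem select_iter_string_py_spec : Claim_equal_select_iter_string_py := by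
  intro sb it _
  unfold Spec_select_iter_string_py select_iter_string_py select_iter_string_py_alt
  by_cases hnil : sb = []
  · simp [hnil]
  · rw [if_neg hnil, if_neg hnil]
    have hlen : 0 < sb.length := List.length_pos_of_ne_nil hnil
    show selAGo sb it 0 ""
      = selBGo sb (if 0 ≤ it ∧ it < (sb.length : Int) then it else (sb.length : Int) - 1).toNat
    by_cases hr : 0 ≤ it ∧ it < (sb.length : Int)
    · -- in-range iteration: the effective stop index is it.toNat
      have hmi : ((it.toNat : Nat) : Int) = it := Int.toNat_of_nonneg hr.1
      have hm : it.toNat < sb.length := by omega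
      rw [selAGo_eq_win sb it it.toNat hm
        (by intro j hj hji; omega) (Or.inl hmi) 0 "" (by omega)]
      rw [if_pos hr, selBGo_eq_win]
      rw [Nat.sub_zero]
    · -- out-of-range iteration: the loop never breaks, the stop index is length - 1
      have hm : sb.length - 1 < sb.length := by omega
      rw [selAGo_eq_win sb it (sb.length - 1) hm
        (by intro j hj hji; push Not at hr; omega) (Or.inr (by omega)) 0 "" (by omega)]
      rw [if_neg hr, selBGo_eq_win]
      have h2 : ((sb.length : Int) - 1).toNat = sb.length - 1 := by omega
      rw [h2]
      have h3 : sb.length - 1 + 1 - 0 = sb.length - 1 + 1 := by omega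
      rw [h3]
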